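-- pv_equiv track=rewrite | github.com/andrey-yemelyanov/competitive-programming | cp-book/ch1/adhoc/card/555_BridgeHands.py | card
-- ===== SOURCE A (Python) =====
-- rank_map = dict([(t[1], t[0]) for t in enumerate(["2", "3", "4", "5", "6", "7", "8", "9", "T", "J", "Q", "K", "A"])])
--
-- suit_map = {"C" : 0, "D" : 1, "S" : 2, "H" : 3}
--
-- def card(code):
--     suit_value = code // len(rank_map)
--     suit = None
--     for k,v in suit_map.items():
--         if v == suit_value:
--             suit = k
--     rank_value = code % len(rank_map)
--     rank = None
--     for k,v in rank_map.items():
--         if v == rank_value: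
--             rank = k
--     return suit + rank
-- ===== SOURCE B (Python) =====
-- # Precompute the whole 52-card deck once as a flat table; card() is a single list lookup.
-- DECK = [s + r for s in "CDSH" for r in "23456789TJQKA"]
--
-- def card(code):
--     return DECK[code]
-- ===== Notes on version B (the rewrite author's own statement) =====
-- stated objective: simpler
-- what changed: Replaces A's divmod decomposition plus two reverse scans over dict items with a precomputed 52-entry deck table indexed directly by the code; no //13, %13 or loop remains at call time.
import Mathlib
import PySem

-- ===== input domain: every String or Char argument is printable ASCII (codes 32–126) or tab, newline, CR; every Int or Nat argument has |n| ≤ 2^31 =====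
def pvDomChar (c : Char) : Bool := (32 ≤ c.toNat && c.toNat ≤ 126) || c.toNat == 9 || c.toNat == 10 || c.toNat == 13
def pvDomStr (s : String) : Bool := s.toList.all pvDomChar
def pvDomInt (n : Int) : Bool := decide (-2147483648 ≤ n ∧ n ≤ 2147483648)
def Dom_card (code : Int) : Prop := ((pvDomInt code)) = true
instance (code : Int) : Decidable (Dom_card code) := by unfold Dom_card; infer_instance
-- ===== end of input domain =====

-- B replaces A's divmod-plus-reverse-scan logic with one precomputed 52-entry deck table indexed directly (simpler).

-- ===== PORT A =====
-- rank_map = dict([(t[1], t[0]) for t in enumerate([...13 ranks...])])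
def rankItems : List (String × Int) :=
  (PySem.List.enumerate ["2","3","4","5","6","7","8","9","T","J","Q","K","A"]).map
    (fun t => (t.2, t.1))
def suitItems : List (String × Int) := [("C", 0), ("D", 1), ("S", 2), ("H", 3)]

def card (code : Int) : String :=
  let suitValue := PySem.Int.floordiv code (rankItems.length : Int)
  let suit : Option String :=
    suitItems.foldl (fun acc kv => if kv.2 = suitValue then some kv.1 else acc) none
  let rankValue := PySem.Int.mod code (rankItems.length : Int)
  let rank : Option String :=
    rankItems.foldl (fun acc kv => if kv.2 = rankValue then some kv.1 else acc) none
  -- 'suit + rank' raises TypeError when either is None; Pre_card excludes those inputs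
  String.mk ((suit.getD "").toList ++ (rank.getD "").toList)

-- ===== PORT B =====
-- DECK = [s + r for s in "CDSH" for r in "23456789TJQKA"]
def deck : List String :=
  ("CDSH".toList).flatMap (fun s => ("23456789TJQKA".toList).map (fun r => String.mk [s, r]))

def card_alt (code : Int) : String :=
  (PySem.List.pyGet? deck code).getD ""   -- getD unreachable under Pre_card (Python raises IndexError there)

-- ===== PRECONDITION & SPEC =====
-- Exactly the inputs on which Python A returns: outside 0 ≤ code < 52 the suit lookup
-- stays None and 'None + rank' raises TypeError.
def Pre_card (code : Int) : Prop := 0 ≤ code ∧ code < 52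
instance (code : Int) : Decidable (Pre_card code) := by unfold Pre_card; infer_instance
def pvWitness_card : Int := (17)

def Spec_card (code : Int) (out : String) : Prop := out = card_alt code
instance (code : Int) (out : String) : Decidable (Spec_card code out) := by unfold Spec_card; infer_instance

-- ===== CLAIM (what is proved, stated in full; the proofs are below) =====
def Claim_equal_card : Prop := ∀ (code : Int), Dom_card code → Pre_card code → Spec_card code (card code)

-- ===== LEMMAS AND PROOFS =====

-- ===== VERDICT (by name: the statement is the Claim_ definition above) =====
theorem card_spec : Claim_equal_card := by
  unfold Claim_equal_card
  intro code _ hpre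
  obtain ⟨h0, h1⟩ := hpre
  unfold Spec_card
  interval_cases code <;> decide
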